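-- pv_equiv track=rewrite | github.com/andziuba/algorithms-and-data-structures | Graph Traversal/table_of_edges.py | table_of_edges_dfs
-- ===== SOURCE A (Python) =====
-- def table_of_edges_dfs(vertices, edges_list):
--     visited = {v: 0 for v in vertices}
--
--     dfs_order = []
--
--     def dfs(current):
--         visited[current] = 1
--         dfs_order.append(current)
--         for edge in edges_list:
--             if edge[0] == current and not visited[edge[1]]:
--                 dfs(edge[1])
--
--     for v in visited:
--         if visited[v] == 0:
--             dfs(v)
--
--     return dfs_order
-- ===== SOURCE B (Python) =====
-- def table_of_edges_dfs(vertices, edges_list):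
--     # Iterative DFS with an explicit stack instead of A's recursion; neighbors are
--     # pushed in reversed edge order and the visited check happens at pop time, which
--     # reproduces the recursive pre-order exactly.
--     visited = {v: 0 for v in vertices}
--     dfs_order = []
--     for v in visited:
--         if visited[v] == 0:
--             stack = [v]
--             while stack:
--                 node = stack.pop()
--                 if visited.get(node, 1) == 0:
--                     visited[node] = 1
--                     dfs_order.append(node)
--                     for edge in reversed(edges_list):
--                         if edge[0] == node:
--                             stack.append(edge[1])
--     return dfs_order
-- ===== Notes on version B (the rewrite author's own statement) =====
-- stated objective: alternative
-- what changed: B replaces A's recursive dfs helper with an iterative explicit-stack loop (neighbors pushed in reversed edge order, visited check at pop time), keeping the direct edge-list scan.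
import Mathlib
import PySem

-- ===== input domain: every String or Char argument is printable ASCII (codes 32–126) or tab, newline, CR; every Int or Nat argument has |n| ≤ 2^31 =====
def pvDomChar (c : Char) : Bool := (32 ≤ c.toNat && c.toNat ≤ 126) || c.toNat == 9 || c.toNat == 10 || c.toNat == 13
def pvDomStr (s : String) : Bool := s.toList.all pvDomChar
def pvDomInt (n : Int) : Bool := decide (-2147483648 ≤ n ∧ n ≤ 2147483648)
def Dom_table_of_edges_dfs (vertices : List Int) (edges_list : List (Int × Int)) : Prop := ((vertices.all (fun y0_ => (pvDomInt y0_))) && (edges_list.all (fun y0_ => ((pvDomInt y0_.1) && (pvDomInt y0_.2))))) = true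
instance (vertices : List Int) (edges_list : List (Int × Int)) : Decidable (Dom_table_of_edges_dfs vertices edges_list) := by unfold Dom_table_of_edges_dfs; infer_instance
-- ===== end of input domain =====

-- B replaces A's recursive dfs helper with an iterative explicit-stack loop (neighbors pushed in
-- reversed edge order, visited check at pop time), keeping the direct edge-list scan (alternative).
-- A's port carries fuel (vertices.length + 1, ample: one unit per newly-marked vertex) only to make
-- the recursion total; the visited lookup uses default 1 (missing key ⇒ no recursion) — inputs where
-- the Python A raises KeyError are excluded by Pre_.

-- ===== PORT A =====
mutual
def dfsA (edges : List (Int × Int)) : Nat → Int → (PySem.Dict Int Int × List Int) → (PySem.Dict Int Int × List Int)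
  | 0, _, st => st
  | fuel+1, current, st => loopA edges fuel current edges (st.1.insert current 1, st.2 ++ [current])
  termination_by fuel _ _ => (fuel, 0)
def loopA (edges : List (Int × Int)) : Nat → Int → List (Int × Int) → (PySem.Dict Int Int × List Int) → (PySem.Dict Int Int × List Int)
  | _, _, [], st => st
  | fuel, current, e :: tl, st =>
      loopA edges fuel current tl (if e.1 == current && st.1.getD e.2 1 == 0 then dfsA edges fuel e.2 st else st)
  termination_by fuel _ rest _ => (fuel, rest.length + 1)
end

def table_of_edges_dfs (vertices : List Int) (edges_list : List (Int × Int)) : List Int :=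
  let visited := vertices.foldl (fun d v => d.insert v 0) PySem.Dict.empty
  (visited.keys.foldl
    (fun st v => if st.1.getD v 1 == 0 then dfsA edges_list (vertices.length + 1) v st else st)
    (visited, [])).2

-- ===== PORT B =====
-- number of still-unvisited keys of the visited dict: the while-loop's termination measure
def Zc (d : PySem.Dict Int Int) : Nat := (d.items.filter (fun p => p.2 == 0)).length

-- marking an unvisited key strictly decreases Zc (cited by loopW's decreasing_by)
-- replacing entries keyed `node` by value 1 cannot increase the zero count
lemma zmap_le_aux (node : Int) :
    ∀ (l : List (Int × Int)),
      (List.filter (fun p => p.2 == 0)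
        (l.map (fun p => if (p.1 == node) = true then ((node : Int), (1 : Int)) else p))).length
        ≤ (List.filter (fun p => p.2 == 0) l).length := by
  intro l
  induction l with
  | nil => simp
  | cons a tl ih =>
    rw [List.map_cons, List.filter_cons, List.filter_cons]
    by_cases hb : (a.1 == node) = true
    · rw [if_pos hb, if_neg (by simp)]
      split
      · simp only [List.length_cons]
        exact Nat.le_succ_of_le ih
      · exact ih
    · rw [if_neg hb]
      by_cases ha : (a.2 == 0) = true
      · rw [if_pos ha, if_pos ha]
        simp only [List.length_cons]
        exact Nat.succ_le_succ ih
      · rw [if_neg ha, if_neg ha]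
        exact ih

lemma Zc_insert_lt (d : PySem.Dict Int Int) (node : Int) (h : (d.getD node 1 == 0) = true) :
    Zc (d.insert node 1) < Zc d := by
  have hg : d.get? node = some 0 := by
    rcases hg : d.get? node with _ | v
    · simp [PySem.Dict.getD_eq_get?_getD, hg] at h
    · simp [PySem.Dict.getD_eq_get?_getD, hg] at h
      simp [h]
  have hc : d.contains node = true := by
    rw [PySem.Dict.contains_eq_isSome_get?, hg]; rfl
  have hmem : (node, (0 : Int)) ∈ d.items := PySem.Dict.mem_items_of_get?_eq_some _ hg
  rw [Zc, Zc, PySem.Dict.items_insert_of_contains d 1 hc]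
  obtain ⟨l1, l2, hsplit⟩ := List.append_of_mem hmem
  rw [hsplit, List.map_append, List.map_cons, List.filter_append, List.filter_append,
    List.filter_cons, List.filter_cons]
  have hhead : ((if (((node, (0 : Int)).1 == node) = true) then ((node : Int), (1 : Int))
      else (node, 0)) : Int × Int) = (node, 1) := by simp
  rw [hhead, if_neg (show ¬ ((((node : Int), (1 : Int)).2 == 0) = true) from by simp),
    if_pos (show (((node : Int), (0 : Int)).2 == 0) = true from by simp)]
  simp only [List.length_append, List.length_cons]
  have h1 := zmap_le_aux node l1
  have h2 := zmap_le_aux node l2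
  omega

def loopW (edges : List (Int × Int)) : List Int → (PySem.Dict Int Int × List Int) → (PySem.Dict Int Int × List Int)
  | [], st => st
  | node :: stk, st =>
      if h : (st.1.getD node 1 == 0) = true then
        loopW edges
          (edges.reverse.foldl (fun s e => if e.1 == node then e.2 :: s else s) stk)
          (st.1.insert node 1, st.2 ++ [node])
      else loopW edges stk st
  termination_by stk st => (Zc st.1, stk.length)
  decreasing_by
  · exact Prod.Lex.left _ _ (Zc_insert_lt _ _ h)
  · exact Prod.Lex.right _ (Nat.lt_succ_self _)

def table_of_edges_dfs_alt (vertices : List Int) (edges_list : List (Int × Int)) : List Int :=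
  let visited := vertices.foldl (fun d v => d.insert v 0) PySem.Dict.empty
  (visited.keys.foldl
    (fun st v => if st.1.getD v 1 == 0 then loopW edges_list [v] st else st)
    (visited, [])).2

-- ===== PRECONDITION & SPEC =====
-- Pre_ excludes exactly the inputs where the Python A raises KeyError: an edge whose source is a
-- vertex (hence eventually visited) but whose target is not a key of the visited dict.
def Pre_table_of_edges_dfs (vertices : List Int) (edges_list : List (Int × Int)) : Prop :=
  ∀ e ∈ edges_list, e.1 ∈ vertices → e.2 ∈ vertices
instance (vertices : List Int) (edges_list : List (Int × Int)) : Decidable (Pre_table_of_edges_dfs vertices edges_list) := by unfold Pre_table_of_edges_dfs; infer_instance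
def pvWitness_table_of_edges_dfs : List Int × (List (Int × Int)) := ([0, 1, 2], [(0, 1), (2, 0)])

def Spec_table_of_edges_dfs (vertices : List Int) (edges_list : List (Int × Int)) (out : List Int) : Prop := out = table_of_edges_dfs_alt vertices edges_list
instance (vertices : List Int) (edges_list : List (Int × Int)) (out : List Int) : Decidable (Spec_table_of_edges_dfs vertices edges_list out) := by unfold Spec_table_of_edges_dfs; infer_instance

-- ===== CLAIM (what is proved, stated in full; the proofs are below) =====
def Claim_equal_table_of_edges_dfs : Prop := ∀ (vertices : List Int) (edges_list : List (Int × Int)), Dom_table_of_edges_dfs vertices edges_list → Pre_table_of_edges_dfs vertices edges_list → Spec_table_of_edges_dfs vertices edges_list (table_of_edges_dfs vertices edges_list)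
-- ===== LEMMAS AND PROOFS =====

-- A's fold step over a list of popped/scanned targets
def stepFold (edges : List (Int × Int)) (f : Nat) (ws : List Int)
    (st : PySem.Dict Int Int × List Int) : PySem.Dict Int Int × List Int :=
  ws.foldl (fun st w => if st.1.getD w 1 == 0 then dfsA edges f w st else st) st

lemma Zc_insert_le (d : PySem.Dict Int Int) (k : Int) : Zc (d.insert k 1) ≤ Zc d := by
  rw [Zc, Zc, PySem.Dict.items_insert]
  split
  · exact zmap_le_aux k d.items
  · rw [List.filter_append]
    simp

lemma getD_zero_get? (d : PySem.Dict Int Int) (node : Int) (h : (d.getD node 1 == 0) = true) :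
    d.get? node = some 0 := by
  rcases hg : d.get? node with _ | v
  · simp [PySem.Dict.getD_eq_get?_getD, hg] at h
  · simp [PySem.Dict.getD_eq_get?_getD, hg] at h
    simp [h]

lemma Zc_one_le (d : PySem.Dict Int Int) (w : Int) (h : (d.getD w 1 == 0) = true) : 1 ≤ Zc d := by
  have hmem : (w, (0 : Int)) ∈ d.items :=
    PySem.Dict.mem_items_of_get?_eq_some _ (getD_zero_get? d w h)
  have : (w, (0 : Int)) ∈ d.items.filter (fun p => p.2 == 0) := by
    simp [List.mem_filter, hmem]
  rw [Zc]
  exact List.length_pos_of_mem this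

lemma Zc_dfsA_le (edges : List (Int × Int)) :
    ∀ (f : Nat) (v : Int) (st : PySem.Dict Int Int × List Int),
      Zc (dfsA edges f v st).1 ≤ Zc st.1 := by
  intro f
  induction f with
  | zero => intro v st; simp [dfsA]
  | succ g ih =>
    intro v st
    rw [dfsA]
    have hloop : ∀ (rest : List (Int × Int)) (st' : PySem.Dict Int Int × List Int),
        Zc (loopA edges g v rest st').1 ≤ Zc st'.1 := by
      intro rest
      induction rest with
      | nil => intro st'; simp [loopA]
      | cons e tl ihr =>
        intro st'
        rw [loopA]
        refine le_trans (ihr _) ?_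
        split
        · exact ih _ _
        · exact le_refl _
    exact le_trans (hloop _ _) (Zc_insert_le _ _)

lemma Zc_stepFold_le (edges : List (Int × Int)) (f : Nat) :
    ∀ (ws : List Int) (st : PySem.Dict Int Int × List Int),
      Zc (stepFold edges f ws st).1 ≤ Zc st.1 := by
  intro ws
  induction ws with
  | nil => intro st; simp [stepFold]
  | cons w tl ih =>
    intro st
    rw [stepFold, List.foldl_cons]
    refine le_trans (ih _) ?_
    split
    · exact Zc_dfsA_le _ _ _ _
    · exact le_refl _

-- A's edge scan is the fold of the visit step over the matching targets
lemma loopA_eq_fold (edges : List (Int × Int)) (f : Nat) (v : Int) :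
    ∀ (rest : List (Int × Int)) (st : PySem.Dict Int Int × List Int),
      loopA edges f v rest st = stepFold edges f ((rest.filter (fun e => e.1 == v)).map (·.2)) st := by
  intro rest
  induction rest with
  | nil => intro st; simp [loopA, stepFold]
  | cons e tl ih =>
    intro st
    rw [loopA, ih]
    by_cases h : (e.1 == v) = true
    · have hf : List.filter (fun e => e.1 == v) (e :: tl) = e :: List.filter (fun e => e.1 == v) tl :=
        List.filter_cons_of_pos h
      rw [hf, List.map_cons]
      simp only [stepFold, List.foldl_cons]
      rw [h, Bool.true_and]
    · have hf : List.filter (fun e => e.1 == v) (e :: tl) = List.filter (fun e => e.1 == v) tl :=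
        List.filter_cons_of_neg h
      rw [hf]
      have hc : (e.1 == v && st.1.getD e.2 1 == 0) = false := by
        rw [Bool.and_eq_false_iff]
        left
        simpa using h
      rw [hc]
      simp only [Bool.false_eq_true, if_false]

lemma dfsA_succ (edges : List (Int × Int)) (g : Nat) (v : Int)
    (st : PySem.Dict Int Int × List Int) :
    dfsA edges (g+1) v st
      = stepFold edges g ((edges.filter (fun e => e.1 == v)).map (·.2))
          (st.1.insert v 1, st.2 ++ [v]) := by
  rw [dfsA, loopA_eq_fold]

-- B's reversed push scan prepends the matching targets to the stack
lemma push_eq (node : Int) :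
    ∀ (l : List (Int × Int)) (s : List Int),
      l.reverse.foldl (fun s e => if e.1 == node then e.2 :: s else s) s
        = (l.filter (fun e => e.1 == node)).map (·.2) ++ s := by
  intro l
  induction l with
  | nil => intro s; simp
  | cons a tl ih =>
    intro s
    rw [List.reverse_cons, List.foldl_append, ih]
    by_cases h : (a.1 == node) = true
    · have hf : List.filter (fun e => e.1 == node) (a :: tl)
          = a :: List.filter (fun e => e.1 == node) tl := List.filter_cons_of_pos h
      rw [hf, List.map_cons]
      simp only [List.foldl_cons, List.foldl_nil]
      rw [if_pos h]
      rfl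
    · have hf : List.filter (fun e => e.1 == node) (a :: tl)
          = List.filter (fun e => e.1 == node) tl := List.filter_cons_of_neg h
      rw [hf]
      simp only [List.foldl_cons, List.foldl_nil]
      rw [if_neg h]

-- the crux: processing ws on B's stack equals folding A's visit step over ws
lemma main_eq (edges : List (Int × Int)) :
    ∀ (n : Nat) (ws : List Int) (f : Nat) (stk : List Int)
      (st : PySem.Dict Int Int × List Int),
      Zc st.1 ≤ n → Zc st.1 ≤ f →
      loopW edges (ws ++ stk) st = loopW edges stk (stepFold edges f ws st) := by
  intro n
  induction n using Nat.strong_induction_on with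
  | _ n IHn =>
    intro ws
    induction ws with
    | nil => intro f stk st _ _; simp [stepFold]
    | cons w ws' IHw =>
      intro f stk st hn hf
      by_cases h : (st.1.getD w 1 == 0) = true
      · have h1 : 1 ≤ Zc st.1 := Zc_one_le _ _ h
        obtain ⟨g, rfl⟩ : ∃ g, f = g + 1 := ⟨f - 1, by omega⟩
        have hmark : Zc (st.1.insert w 1) < Zc st.1 := Zc_insert_lt _ _ h
        rw [List.cons_append, loopW, dif_pos h, push_eq]
        have hZ1 : Zc (st.1.insert w 1, st.2 ++ [w]).1 ≤ n - 1 := by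
          show Zc (st.1.insert w 1) ≤ n - 1
          omega
        have hZ1g : Zc (st.1.insert w 1, st.2 ++ [w]).1 ≤ g := by
          show Zc (st.1.insert w 1) ≤ g
          omega
        rw [IHn (n-1) (by omega) _ g _ _ hZ1 hZ1g, ← dfsA_succ]
        have hZ2 : Zc (dfsA edges (g+1) w st).1 ≤ n - 1 := by
          rw [dfsA_succ]
          exact le_trans (Zc_stepFold_le _ _ _ _) hZ1
        have hZ2g : Zc (dfsA edges (g+1) w st).1 ≤ g := by
          rw [dfsA_succ]
          exact le_trans (Zc_stepFold_le _ _ _ _) hZ1g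
        have hZ2f : Zc (dfsA edges (g+1) w st).1 ≤ g + 1 := le_trans hZ2g (Nat.le_succ _)
        rw [IHn (n-1) (by omega) ws' (g+1) _ _ hZ2 hZ2f]
        simp only [stepFold, List.foldl_cons]
        rw [if_pos h]
      · rw [List.cons_append, loopW, dif_neg h, IHw f stk st hn hf]
        simp only [stepFold, List.foldl_cons]
        rw [if_neg h]

lemma Zc_le_size (d : PySem.Dict Int Int) : Zc d ≤ d.items.length :=
  List.length_filter_le _ _

lemma size_foldl_insert_le (l : List Int) :
    ∀ (d : PySem.Dict Int Int),
      ((l.foldl (fun d v => d.insert v 0) d).items).length ≤ d.items.length + l.length := by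
  induction l with
  | nil => intro d; simp
  | cons a tl ih =>
    intro d
    rw [List.foldl_cons]
    refine le_trans (ih _) ?_
    rw [PySem.Dict.items_insert]
    split
    · simp only [List.length_map, List.length_cons]
      omega
    · simp only [List.length_append, List.length_cons, List.length_nil]
      omega

-- the outer vertex loops agree step by step while Zc stays below the fuel
lemma outer_eq (edges : List (Int × Int)) (F : Nat) :
    ∀ (ks : List Int) (st : PySem.Dict Int Int × List Int), Zc st.1 ≤ F →
      ks.foldl (fun st v => if st.1.getD v 1 == 0 then dfsA edges F v st else st) st
        = ks.foldl (fun st v => if st.1.getD v 1 == 0 then loopW edges [v] st else st) st := by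
  intro ks
  induction ks with
  | nil => intro st _; rfl
  | cons k tl ih =>
    intro st hF
    rw [List.foldl_cons, List.foldl_cons]
    by_cases h : (st.1.getD k 1 == 0) = true
    · rw [if_pos h, if_pos h]
      have hB : loopW edges [k] st = stepFold edges F [k] st := by
        have h0 := main_eq edges (Zc st.1) [k] F [] st (le_refl _) hF
        simpa [loopW] using h0
      have hA : stepFold edges F [k] st = dfsA edges F k st := by
        simp only [stepFold, List.foldl_cons, List.foldl_nil]
        rw [if_pos h]
      rw [hB, hA]
      exact ih _ (le_trans (Zc_dfsA_le _ _ _ _) hF)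
    · rw [if_neg h, if_neg h]
      exact ih _ hF

-- ===== VERDICT (by name: the statement is the Claim_ definition above) =====
theorem table_of_edges_dfs_spec : Claim_equal_table_of_edges_dfs := by
  intro vertices edges_list _ _
  unfold Spec_table_of_edges_dfs table_of_edges_dfs table_of_edges_dfs_alt
  have hZ : Zc (vertices.foldl (fun d v => d.insert v 0) PySem.Dict.empty) ≤ vertices.length + 1 := by
    refine le_trans (Zc_le_size _) (le_trans (size_foldl_insert_le _ _) ?_)
    simp [PySem.Dict.empty]
  exact congrArg Prod.snd (outer_eq edges_list (vertices.length + 1)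
    (List.foldl (fun d v => d.insert v 0) (PySem.Dict.empty : PySem.Dict Int Int) vertices).keys
    ((List.foldl (fun d v => d.insert v 0) (PySem.Dict.empty : PySem.Dict Int Int) vertices),
      ([] : List Int)) hZ)
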